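-- pv_equiv track=rewrite | github.com/gvanderest/undermountain | utils/tablefy.py | tablefy
-- ===== SOURCE A (Python) =====
-- def tablefy(data, column=None, gutter=1, width=79):
--     """
--     Convert a list of strings into being a table, displaying in a left-to-right
--     and top-to-bottom pattern.  This does not sort the values.
--
--     :param data: list of strings
--     :param column: width of column, if None, detected
--     :param gutter: width of gutter
--     :param width: width of entire table to fill
--     :returns: newline separated string
--     """
--
--     if not data:
--         return ""
--
--     lines = []
--
--     if column is None:
--         column = max([len(s) for s in data])
--
--     per_line = max(int(width / column), 1)
--
--     gutter_chars = " " * gutter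
--
--     items = []
--     for entry in data:
--         items.append(entry.ljust(column))
--         if len(items) == per_line:
--             lines.append(gutter_chars.join(items))
--             items = []
--
--     if items:
--         lines.append(gutter_chars.join(items))
--
--     return "\n".join(lines)
-- ===== SOURCE B (Python) =====
-- def tablefy(data, column=None, gutter=1, width=79):
--     """
--     Convert a list of strings into being a table, displaying in a left-to-right
--     and top-to-bottom pattern.  This does not sort the values.
--     """
--     if not data:
--         return ""
--
--     if column is None:
--         column = max(len(s) for s in data)
--
--     per_line = max(int(width / column), 1)
--     gutter_chars = " " * gutter
--
--     lines = []
--     for i in range(0, len(data), per_line):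
--         chunk = data[i:i + per_line]
--         lines.append(gutter_chars.join(s.ljust(column) for s in chunk))
--
--     return "\n".join(lines)
-- ===== Notes on version B (the rewrite author's own statement) =====
-- stated objective: simpler
-- what changed: Replaces the accumulate-and-flush item buffer with direct iteration over row starts (range stepping by per_line) and slicing each row out of the list, dropping the running buffer and its length counter.
-- outside the precondition, e.g. on tablefy(['x'], 0, 1, 79): A raises ZeroDivisionError, B raises ZeroDivisionError; on tablefy(['', ''], None, 1, 79): A raises ZeroDivisionError, B raises ZeroDivisionError
import Mathlib
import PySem

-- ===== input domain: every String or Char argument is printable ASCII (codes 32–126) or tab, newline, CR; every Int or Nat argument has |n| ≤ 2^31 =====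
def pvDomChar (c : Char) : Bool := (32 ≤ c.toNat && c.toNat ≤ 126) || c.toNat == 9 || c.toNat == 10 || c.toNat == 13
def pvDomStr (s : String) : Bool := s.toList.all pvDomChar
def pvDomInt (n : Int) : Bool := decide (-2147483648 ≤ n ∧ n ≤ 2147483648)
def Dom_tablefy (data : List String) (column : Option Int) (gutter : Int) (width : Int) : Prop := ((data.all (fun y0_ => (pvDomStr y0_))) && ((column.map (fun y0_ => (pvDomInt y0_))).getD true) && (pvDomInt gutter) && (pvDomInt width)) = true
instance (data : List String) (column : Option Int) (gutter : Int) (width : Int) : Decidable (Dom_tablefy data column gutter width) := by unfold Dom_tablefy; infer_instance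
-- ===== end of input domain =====

-- B replaces A's accumulate-and-flush item buffer by iterating over row starts and slicing
-- each row out of the list (objective: simpler). Equivalence of return values is proved on
-- Pre_ (the inputs where A does not raise ZeroDivisionError).

-- ===== PORT A =====
-- s.ljust(w) (w : Int; no padding when w ≤ len(s)) — exact, shared by both Pythons
def pvLjust (s : String) (w : Int) : String :=
  String.ofList (s.toList ++ List.replicate (w - (s.toList.length : Int)).toNat ' ')

def tablefy (data : List String) (column : Option Int) (gutter : Int) (width : Int) : String :=
  if data = [] then "" else
    let col : Int := match column with
      | some c => c
      | none => PySem.List.maxD (data.map (fun s => PySem.Str.len s)) (fun x => x) 0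
    let perLine : Int := max (PySem.Int.truncdiv width col) 1
    let gutterChars : String := String.ofList (List.replicate gutter.toNat ' ')
    let st := data.foldl (fun (st : List String × List String) entry =>
        let items := st.2 ++ [pvLjust entry col]
        if (items.length : Int) = perLine then (st.1 ++ [PySem.Str.join gutterChars items], ([] : List String))
        else (st.1, items)) (([] : List String), ([] : List String))
    let lines := if st.2 ≠ [] then st.1 ++ [PySem.Str.join gutterChars st.2] else st.1
    PySem.Str.join "\n" lines

-- ===== PORT B =====
-- 'for i in range(0, len(data), per_line): chunk = data[i:i+per_line]' — the slice loop as
-- structural recursion: each step takes one chunk and recurses on the rest (n+1 = per_line ≥ 1)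
def pvRows (gutterChars : String) (col : Int) (n : Nat) : List String → List String
  | [] => []
  | x :: xs =>
      PySem.Str.join gutterChars (((x :: xs).take (n + 1)).map (fun s => pvLjust s col))
        :: pvRows gutterChars col n ((x :: xs).drop (n + 1))
termination_by l => l.length
decreasing_by simp only [List.length_drop, List.length_cons]; omega

def tablefy_alt (data : List String) (column : Option Int) (gutter : Int) (width : Int) : String :=
  if data = [] then "" else
    let col : Int := match column with
      | some c => c
      | none => PySem.List.maxD (data.map (fun s => PySem.Str.len s)) (fun x => x) 0
    let perLine : Int := max (PySem.Int.truncdiv width col) 1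
    let gutterChars : String := String.ofList (List.replicate gutter.toNat ' ')
    PySem.Str.join "\n" (pvRows gutterChars col (perLine.toNat - 1) data)

-- ===== PRECONDITION & SPEC =====
-- Pre_ excludes exactly the inputs where A raises ZeroDivisionError in int(width/column):
-- an explicit column of 0, or column=None with every string empty (detected column 0).
def Pre_tablefy (data : List String) (column : Option Int) (gutter : Int) (width : Int) : Prop :=
  data = [] ∨ (column ≠ some 0 ∧ (column = none → ∃ s ∈ data, s ≠ ""))
instance (data : List String) (column : Option Int) (gutter : Int) (width : Int) : Decidable (Pre_tablefy data column gutter width) := by unfold Pre_tablefy; infer_instance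

def pvWitness_tablefy : List String × Option Int × Int × Int := (["ab", "c", "def"], none, 1, 10)

def Spec_tablefy (data : List String) (column : Option Int) (gutter : Int) (width : Int) (out : String) : Prop := out = tablefy_alt data column gutter width
instance (data : List String) (column : Option Int) (gutter : Int) (width : Int) (out : String) : Decidable (Spec_tablefy data column gutter width out) := by unfold Spec_tablefy; infer_instance

-- ===== CLAIM (what is proved, stated in full; the proofs are below) =====
def Claim_equal_tablefy : Prop := ∀ (data : List String) (column : Option Int) (gutter : Int) (width : Int), Dom_tablefy data column gutter width → Pre_tablefy data column gutter width → Spec_tablefy data column gutter width (tablefy data column gutter width)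

-- ===== LEMMAS AND PROOFS =====

-- A's loop body, with per_line = n+1
def pvStep (g : String) (col : Int) (n : Nat) (st : List String × List String) (entry : String) : List String × List String :=
  let items := st.2 ++ [pvLjust entry col]
  if (items.length : Int) = ((n : Int) + 1) then (st.1 ++ [PySem.Str.join g items], ([] : List String))
  else (st.1, items)

-- no flush happens while the buffer stays short
lemma pvFoldl_short (g : String) (col : Int) (n : Nat) :
    ∀ (l : List String) (lines items : List String), items.length + l.length < n + 1 →
      l.foldl (pvStep g col n) (lines, items) = (lines, items ++ l.map (fun s => pvLjust s col)) := by
  intro l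
  induction l with
  | nil => intro lines items _; simp
  | cons x xs ih =>
      intro lines items h
      simp only [List.length_cons] at h
      simp only [List.foldl_cons, pvStep]
      rw [if_neg (by simp only [List.length_append, List.length_singleton]; push_cast; omega)]
      rw [ih _ _ (by simp only [List.length_append, List.length_singleton]; omega)]
      simp

-- a chunk that exactly fills the buffer flushes one row
lemma pvFoldl_fill (g : String) (col : Int) (n : Nat) :
    ∀ (l : List String) (lines items rest : List String), items.length + l.length = n + 1 → l ≠ [] →
      (l ++ rest).foldl (pvStep g col n) (lines, items) =
        rest.foldl (pvStep g col n) (lines ++ [PySem.Str.join g (items ++ l.map (fun s => pvLjust s col))], []) := by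
  intro l
  induction l with
  | nil => intro _ _ _ _ hne; simp at hne
  | cons x xs ih =>
      intro lines items rest h _
      simp only [List.length_cons] at h
      simp only [List.cons_append, List.foldl_cons, pvStep]
      by_cases hxs : xs = []
      · subst hxs
        simp only [List.length_nil] at h
        rw [if_pos (by simp only [List.length_append, List.length_singleton]; push_cast; omega)]
        simp
      · have hpos : 0 < xs.length := List.length_pos_iff.mpr hxs
        rw [if_neg (by simp only [List.length_append, List.length_singleton]; push_cast; omega)]
        rw [ih _ _ _ (by simp; omega) hxs]
        simp

-- the whole loop + final flush equals the row-chunking recursion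
lemma pvLoop_eq_rows (g : String) (col : Int) (n : Nat) (l lines : List String) :
    (let st := l.foldl (pvStep g col n) (lines, []);
     if st.2 ≠ [] then st.1 ++ [PySem.Str.join g st.2] else st.1) = lines ++ pvRows g col n l := by
  cases l with
  | nil => simp [pvRows]
  | cons x xs =>
      by_cases hshort : (x :: xs).length < n + 1
      · rw [pvFoldl_short g col n (x :: xs) lines [] (by simpa using hshort)]
        rw [pvRows]
        rw [List.take_of_length_le (by omega), List.drop_of_length_le (by omega)]
        simp [pvRows]
      · have hlen : n + 1 ≤ xs.length + 1 := by
          simp only [List.length_cons] at hshort; omega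
        have hsplit := (List.take_append_drop (n + 1) (x :: xs)).symm
        conv_lhs => rw [hsplit]
        rw [pvFoldl_fill g col n ((x :: xs).take (n + 1)) lines [] _
              (by simp only [List.length_nil, Nat.zero_add, List.length_take, List.length_cons]; omega)
              (by simp [List.take_succ_cons])]
        have hrec := pvLoop_eq_rows g col n ((x :: xs).drop (n + 1))
              (lines ++ [PySem.Str.join g (((x :: xs).take (n + 1)).map (fun s => pvLjust s col))])
        simp only [List.nil_append] at hrec ⊢
        rw [hrec]
        rw [pvRows]
        simp
termination_by l.length
decreasing_by simp only [List.length_drop, List.length_cons]; omega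

-- A's computation (col, perLine, gutter fixed) equals B's chunking, for any perLine ≥ 1
lemma pvCore (g : String) (col perLine : Int) (h1 : 1 ≤ perLine) (data : List String) :
    (let st := data.foldl (fun (st : List String × List String) entry =>
        let items := st.2 ++ [pvLjust entry col]
        if (items.length : Int) = perLine then (st.1 ++ [PySem.Str.join g items], ([] : List String))
        else (st.1, items)) (([] : List String), ([] : List String));
     if st.2 ≠ [] then st.1 ++ [PySem.Str.join g st.2] else st.1) = pvRows g col (perLine.toNat - 1) data := by
  obtain ⟨n, hn⟩ : ∃ n : Nat, perLine = (n : Int) + 1 := ⟨perLine.toNat - 1, by omega⟩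
  have htn : perLine.toNat - 1 = n := by omega
  rw [htn, hn]
  have := pvLoop_eq_rows g col n data []
  simpa only [List.nil_append, pvStep] using this

-- ===== VERDICT (by name: the statement is the Claim_ definition above) =====
theorem tablefy_spec : Claim_equal_tablefy := by
  intro data column gutter width hD hP
  clear hD hP
  unfold Spec_tablefy tablefy tablefy_alt
  by_cases hd : data = []
  · simp [hd]
  · rw [if_neg hd, if_neg hd]
    exact congrArg (PySem.Str.join "\n")
      (pvCore (String.ofList (List.replicate gutter.toNat ' '))
        (match column with
          | some c => c
          | none => PySem.List.maxD (data.map (fun s => PySem.Str.len s)) (fun x => x) 0)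
        (max (PySem.Int.truncdiv width (match column with
          | some c => c
          | none => PySem.List.maxD (data.map (fun s => PySem.Str.len s)) (fun x => x) 0)) 1)
        (le_max_right _ _) data)
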